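-- pv_equiv track=rewrite | github.com/pseokyoung/MIT_glyco | OGP-master/script_to_retrieve_all_the_features_for_ML.py | windowMaking
-- ===== SOURCE A (Python) =====
-- def windowMaking(posbef,posaft,psite,seq): #Will return a list from the posbef to posaft the psite of the sequence
--     if type(seq)==list:
--         kk=1
--     else:
--         seq=list(seq)
--     firstAA=psite-posbef
--     lastAA=psite+posaft+1
--     window=[]
--     i=firstAA
--     if i<0:
--         while i <0:
--             window.append("_")
--             i=i+1
--         i=0
--     while i < lastAA:
--         try:
--             seq[i]
--             seq[i]!="\n"
--             window.append(seq[i])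
--         except:
--
--             window.append("_")
--         i=i+1
--     return window
-- ===== SOURCE B (Python) =====
-- def windowMaking(posbef, posaft, psite, seq):
--     if type(seq) == list:
--         kk = 1
--     else:
--         seq = list(seq)
--     start = max(0, psite - posbef)
--     lastAA = psite + posaft + 1
--     left = max(0, posbef - psite)
--     right = max(0, lastAA - max(start, len(seq)))
--     return ["_"] * left + seq[start:max(start, lastAA)] + ["_"] * right
-- ===== Notes on version B (the rewrite author's own statement) =====
-- stated objective: simpler
-- what changed: Replaces A's two element-by-element append loops (left-pad while loop and a try/except indexing loop) with a single list slice plus two arithmetically computed '_' pads.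
import Mathlib
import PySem

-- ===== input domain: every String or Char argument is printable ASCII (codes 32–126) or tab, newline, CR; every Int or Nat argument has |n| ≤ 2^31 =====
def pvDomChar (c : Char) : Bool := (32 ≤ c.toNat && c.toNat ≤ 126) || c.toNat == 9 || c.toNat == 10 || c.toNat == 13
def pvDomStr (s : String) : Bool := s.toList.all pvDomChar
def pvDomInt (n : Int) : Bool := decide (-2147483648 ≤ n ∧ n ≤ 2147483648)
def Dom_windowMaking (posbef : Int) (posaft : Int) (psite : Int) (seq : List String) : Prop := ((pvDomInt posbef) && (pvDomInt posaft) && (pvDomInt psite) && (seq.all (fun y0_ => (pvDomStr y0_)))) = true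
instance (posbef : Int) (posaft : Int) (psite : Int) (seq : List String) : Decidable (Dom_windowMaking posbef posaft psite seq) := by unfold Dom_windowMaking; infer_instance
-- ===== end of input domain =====

-- B replaces A's two element-by-element append loops (with a try/except per index)
-- by a single slice plus two computed pads (objective: simpler).

-- ===== PORT A =====
-- the first 'while i < 0: window.append("_"); i += 1' loop
def padLoop (i : Int) : List String :=
  if _h : i < 0 then "_" :: padLoop (i + 1) else []
termination_by (-i).toNat
decreasing_by omega

-- the second 'while i < lastAA' loop; the try block appends seq[i] when the
-- indexing succeeds and "_" on the IndexError (the discarded 'seq[i]!="\n"'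
-- comparison has no effect on the result)
def mainLoop (seq : List String) (lastAA : Int) (i : Int) : List String :=
  if _h : i < lastAA then
    (match PySem.List.pyGet? seq i with
     | some x => x
     | none => "_") :: mainLoop seq lastAA (i + 1)
  else []
termination_by (lastAA - i).toNat
decreasing_by omega

def windowMaking (posbef : Int) (posaft : Int) (psite : Int) (seq : List String) : List String :=
  -- 'if type(seq)==list: kk=1 else: seq=list(seq)': seq is already a list here
  let firstAA := psite - posbef
  let lastAA := psite + posaft + 1
  if firstAA < 0 then padLoop firstAA ++ mainLoop seq lastAA 0
  else mainLoop seq lastAA firstAA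

-- ===== PORT B =====
def windowMaking_alt (posbef : Int) (posaft : Int) (psite : Int) (seq : List String) : List String :=
  let start := max 0 (psite - posbef)
  let lastAA := psite + posaft + 1
  let left := max 0 (posbef - psite)
  let right := max 0 (lastAA - max start (seq.length : Int))
  List.replicate left.toNat "_"
    ++ PySem.List.slice seq (some start) (some (max start lastAA))
    ++ List.replicate right.toNat "_"

-- ===== PRECONDITION & SPEC =====
def Spec_windowMaking (posbef : Int) (posaft : Int) (psite : Int) (seq : List String) (out : List String) : Prop := out = windowMaking_alt posbef posaft psite seq
instance (posbef : Int) (posaft : Int) (psite : Int) (seq : List String) (out : List String) : Decidable (Spec_windowMaking posbef posaft psite seq out) := by unfold Spec_windowMaking; infer_instance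

-- ===== CLAIM (what is proved, stated in full; the proofs are below) =====
def Claim_equal_windowMaking : Prop := ∀ (posbef : Int) (posaft : Int) (psite : Int) (seq : List String), Dom_windowMaking posbef posaft psite seq → Spec_windowMaking posbef posaft psite seq (windowMaking posbef posaft psite seq)

-- ===== LEMMAS AND PROOFS =====

theorem padLoop_eq_replicate : ∀ (n : Nat) (i : Int), (-i).toNat = n →
    padLoop i = List.replicate n "_" := by
  intro n
  induction n with
  | zero => intro i h; rw [padLoop]; simp; omega
  | succ k ih =>
      intro i h
      rw [padLoop]
      have hi : i < 0 := by omega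
      simp only [hi, dif_pos, List.replicate_succ]
      exact congrArg _ (ih (i + 1) (by omega))

theorem mainLoop_eq : ∀ (k : Nat) (last i : Int) (seq : List String), 0 ≤ i → (last - i).toNat = k →
    mainLoop seq last i
      = PySem.List.slice seq (some i) (some (max i last))
        ++ List.replicate (max 0 (last - max i (seq.length : Int))).toNat "_" := by
  intro k
  induction k with
  | zero =>
      intro last i seq hi hk
      have hle : last ≤ i := by omega
      rw [mainLoop]
      have hmax : max i last = i := by omega
      rw [hmax, PySem.List.slice_toNat seq hi hi]
      have : (max 0 (last - max i (seq.length : Int))).toNat = 0 := by omega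
      simp [this]
      omega
  | succ k ih =>
      intro last i seq hi hk
      have hlt : i < last := by omega
      rw [mainLoop]
      simp only [hlt, dif_pos]
      rw [ih last (i + 1) seq (by omega) (by omega)]
      by_cases hlen : i < (seq.length : Int)
      · -- seq[i] exists
        have hnat : i.toNat < seq.length := by omega
        have hget : PySem.List.pyGet? seq i = some seq[i.toNat] :=
          PySem.List.pyGet?_eq_some_getElem seq hi hlen
        rw [hget]
        have hm1 : max i last = last := by omega
        have hm2 : max (i + 1) last = last := by omega
        rw [hm1, hm2, PySem.List.slice_toNat seq hi (by omega : (0:Int) ≤ last),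
            PySem.List.slice_toNat seq (by omega : (0:Int) ≤ i + 1) (by omega : (0:Int) ≤ last)]
        have hpad : max (i + 1) (seq.length : Int) = max i (seq.length : Int) := by omega
        rw [hpad]
        have hdrop : seq.drop i.toNat = seq[i.toNat] :: seq.drop (i.toNat + 1) :=
          List.drop_eq_getElem_cons hnat
        have h1 : (i + 1).toNat = i.toNat + 1 := by omega
        have h2 : last.toNat - i.toNat = (last.toNat - (i.toNat + 1)) + 1 := by omega
        rw [hdrop, h1, h2, List.take_succ_cons]
        simp
      · -- index out of range: seq[i] raises, "_" appended
        have hge : (seq.length : Int) ≤ i := by omega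
        have hget : PySem.List.pyGet? seq i = none := by
          rw [PySem.List.pyGet?_eq_none_iff]
          intro hr
          unfold PySem.Raise.InRange at hr
          omega
        rw [hget]
        have hd1 : seq.drop i.toNat = [] := by
          apply List.drop_eq_nil_of_le; omega
        have hd2 : seq.drop (i + 1).toNat = [] := by
          apply List.drop_eq_nil_of_le; omega
        rw [PySem.List.slice_toNat seq hi (by omega : (0:Int) ≤ max i last),
            PySem.List.slice_toNat seq (by omega : (0:Int) ≤ i + 1) (by omega : (0:Int) ≤ max (i+1) last),
            hd1, hd2]
        have hp1 : (max 0 (last - max i (seq.length : Int))).toNat = k + 1 := by omega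
        have hp2 : (max 0 (last - max (i + 1) (seq.length : Int))).toNat = k := by omega
        simp [hp1, hp2, List.replicate_succ]

-- ===== VERDICT (by name: the statement is the Claim_ definition above) =====
theorem windowMaking_spec : Claim_equal_windowMaking := by
  intro posbef posaft psite seq _
  unfold Spec_windowMaking windowMaking windowMaking_alt
  simp only []
  by_cases h : psite - posbef < 0
  · simp only [h, if_pos]
    rw [padLoop_eq_replicate (-(psite - posbef)).toNat _ rfl,
        mainLoop_eq (psite + posaft + 1 - 0).toNat _ 0 seq le_rfl rfl]
    have h1 : max 0 (psite - posbef) = 0 := by omega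
    have h2 : (-(psite - posbef)).toNat = (max 0 (posbef - psite)).toNat := by omega
    rw [h1, h2]
    simp
  · simp only [h, if_neg, not_false_iff]
    rw [mainLoop_eq (psite + posaft + 1 - (psite - posbef)).toNat _ (psite - posbef) seq (by omega) rfl]
    have h1 : max 0 (psite - posbef) = psite - posbef := by omega
    have h2 : (max 0 (posbef - psite)).toNat = 0 := by omega
    rw [h1, h2]
    simp
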